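-- pv_equiv track=rewrite | github.com/shubhambhagat98/CSCI-B-551-Elements-Of-Artificial-Intelligence- | assignment 2/part2/quintris.py | agg_height
-- ===== SOURCE A (Python) =====
-- def agg_height(board):
--     height=0
--     for col in range(len(board[0])):
--         for row in range(len(board)-1,-1,-1):
--             if row> 0:
--                 if board[row][col] == 'x':
--                     height+=1
--                 elif board[row][col] == ' ' and board[row-1][col] == 'x':
--                     height+=1
--                 else:
--                     continue
--     return height
-- ===== SOURCE B (Python) =====
-- def agg_height(board):
--     w = len(board[0])
--     filled = sum(row[:w].count('x') for row in board[1:])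
--     blanks = sum(1 for r in range(1, len(board))
--                    for c in range(w)
--                    if board[r][c] == ' ' and board[r - 1][c] == 'x')
--     return filled + blanks
-- ===== Notes on version B (the rewrite author's own statement) =====
-- stated objective: simpler
-- what changed: Replaces A's single column-major bottom-up scan with combined branches by two independent row-major passes: a per-row library count of filled cells plus a separate scan for blanks directly below a filled cell, summed.
import Mathlib
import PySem

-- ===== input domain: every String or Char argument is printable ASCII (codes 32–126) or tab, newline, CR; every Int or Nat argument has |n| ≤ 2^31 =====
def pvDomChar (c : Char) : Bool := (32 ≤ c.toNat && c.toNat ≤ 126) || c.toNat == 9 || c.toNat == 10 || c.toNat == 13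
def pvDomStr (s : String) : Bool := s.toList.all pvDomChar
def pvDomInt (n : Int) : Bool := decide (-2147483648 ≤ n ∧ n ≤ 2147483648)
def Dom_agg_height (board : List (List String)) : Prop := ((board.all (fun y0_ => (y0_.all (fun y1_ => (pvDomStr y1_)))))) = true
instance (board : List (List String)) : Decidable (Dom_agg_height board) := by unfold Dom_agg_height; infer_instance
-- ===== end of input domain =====

-- B replaces A's single column-major bottom-up scan (combined branches) by two independent
-- row-major passes — a per-row count of 'x' cells plus a separate scan for blanks directly
-- below an 'x' — summed; objective: simpler decomposition, same asymptotic cost.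

-- ===== PORT A =====
def agg_height (board : List (List String)) : Int :=
  (PySem.List.pyRange 0 ((PySem.List.pyGetD board 0 []).length : Int) 1).foldl
    (fun height col =>
      (PySem.List.pyRange ((board.length : Int) - 1) (-1) (-1)).foldl
        (fun h row =>
          if row > 0 then
            if PySem.List.pyGetD (PySem.List.pyGetD board row []) col "" = "x" then h + 1
            else if PySem.List.pyGetD (PySem.List.pyGetD board row []) col "" = " " ∧
                    PySem.List.pyGetD (PySem.List.pyGetD board (row - 1) []) col "" = "x" then h + 1
            else h
          else h)
        height)
    0

-- ===== PORT B =====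
def agg_height_alt (board : List (List String)) : Int :=
  let w : Int := ((PySem.List.pyGetD board 0 []).length : Int)
  let filled : Int :=
    ((PySem.List.slice board (some 1) none).map
      (fun row => ((PySem.List.count (PySem.List.slice row none (some w)) "x" : Nat) : Int))).sum
  let blanks : Int :=
    (PySem.List.pyRange 1 (board.length : Int) 1).foldl
      (fun acc r =>
        (PySem.List.pyRange 0 w 1).foldl
          (fun acc2 c =>
            if PySem.List.pyGetD (PySem.List.pyGetD board r []) c "" = " " ∧
               PySem.List.pyGetD (PySem.List.pyGetD board (r - 1) []) c "" = "x"
            then acc2 + 1 else acc2)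
          acc)
      0
  filled + blanks

-- ===== PRECONDITION & SPEC =====
-- Pre_ excludes exactly the inputs on which Python A raises IndexError: the empty board
-- (board[0] fails) and boards where some row is shorter than row 0 (board[row][col] fails).
def Pre_agg_height (board : List (List String)) : Prop :=
  board ≠ [] ∧ ∀ row ∈ board, (board.getD 0 []).length ≤ row.length
instance (board : List (List String)) : Decidable (Pre_agg_height board) := by
  unfold Pre_agg_height; infer_instance
def pvWitness_agg_height : List (List String) := [["x", " "], [" ", "x"], ["x", "o"]]

def Spec_agg_height (board : List (List String)) (out : Int) : Prop := out = agg_height_alt board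
instance (board : List (List String)) (out : Int) : Decidable (Spec_agg_height board out) := by unfold Spec_agg_height; infer_instance

-- ===== CLAIM (what is proved, stated in full; the proofs are below) =====
def Claim_equal_agg_height : Prop := ∀ (board : List (List String)), Dom_agg_height board → Pre_agg_height board → Spec_agg_height board (agg_height board)

-- ===== LEMMAS AND PROOFS =====

def pvCell (board : List (List String)) (r c : Int) : String :=
  PySem.List.pyGetD (PySem.List.pyGetD board r []) c ""

def pvG (board : List (List String)) (r c : Int) : Int :=
  (if pvCell board r c = "x" then 1 else 0) +
  (if pvCell board r c = " " ∧ pvCell board (r - 1) c = "x" then 1 else 0)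

theorem pv_sum_map_swap {α β : Type} (l1 : List α) (l2 : List β) (f : α → β → Int) :
    (l1.map (fun x => (l2.map (f x)).sum)).sum
      = (l2.map (fun y => (l1.map (fun x => f x y)).sum)).sum := by
  induction l1 with
  | nil => simp
  | cons a t ih =>
      simp only [List.map_cons, List.sum_cons, ih, ← PySem.List.sum_map_add_int]

theorem pv_count_take (l : List String) (v : String) (k : Nat) (hk : k ≤ l.length) :
    (((l.take k).count v : Nat) : Int)
      = ((List.range k).map (fun c => if l.getD c "" = v then (1 : Int) else 0)).sum := by
  induction k with
  | zero => simp
  | succ k ih =>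
      rw [List.take_add_one, List.range_succ, List.map_append, List.count_append,
        List.sum_append, ← ih (by omega)]
      have hk' : k < l.length := by omega
      simp only [List.getElem?_eq_getElem hk', Option.toList_some, List.map_cons,
        List.map_nil, List.sum_cons, List.sum_nil, List.getD_eq_getElem l "" hk']
      by_cases hv : l[k] = v <;> simp [hv]

theorem pv_A_inner (board : List (List String)) (hn : board ≠ []) (col : Int) (h : Int) :
    (PySem.List.pyRange ((board.length : Int) - 1) (-1) (-1)).foldl
      (fun h row =>
        if row > 0 then
          if PySem.List.pyGetD (PySem.List.pyGetD board row []) col "" = "x" then h + 1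
          else if PySem.List.pyGetD (PySem.List.pyGetD board row []) col "" = " " ∧
                  PySem.List.pyGetD (PySem.List.pyGetD board (row - 1) []) col "" = "x" then h + 1
          else h
        else h) h
    = h + ((PySem.List.pyRange 1 (board.length : Int) 1).map (fun r => pvG board r col)).sum := by
  have hcong := PySem.List.foldl_congr_mem
    (PySem.List.pyRange ((board.length : Int) - 1) (-1) (-1))
    (fun h row =>
        if row > 0 then
          if PySem.List.pyGetD (PySem.List.pyGetD board row []) col "" = "x" then h + 1
          else if PySem.List.pyGetD (PySem.List.pyGetD board row []) col "" = " " ∧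
                  PySem.List.pyGetD (PySem.List.pyGetD board (row - 1) []) col "" = "x" then h + 1
          else h
        else h)
    (fun h row => h + (if 0 < row then pvG board row col else 0)) h
    (by
      intro acc row _
      by_cases hr : 0 < row
      · simp only [hr, if_pos]
        unfold pvG pvCell
        split_ifs with h1 h2 <;>
          first
            | omega
            | (exact absurd (h1 ▸ h2.1) (by decide))
      · simp [hr])
  rw [hcong, PySem.List.foldl_add]
  congr 1
  have hrev := PySem.List.pyRange_neg_one_eq_reverse ((board.length : Int) - 1) (-1)
  have h0 : (-1 : Int) + 1 = 0 := by norm_num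
  have h1 : ((board.length : Int) - 1) + 1 = (board.length : Int) := by ring
  rw [h0, h1] at hrev
  rw [hrev, List.map_reverse, List.sum_reverse]
  have hlen : (0 : Int) < (board.length : Int) := by
    have : board.length ≠ 0 := by simpa [List.length_eq_zero_iff] using hn
    omega
  rw [PySem.List.pyRange_one_cons hlen]
  simp only [List.map_cons, List.sum_cons]
  rw [if_neg (by omega)]
  rw [List.map_congr_left (fun r hr => by
    rw [if_pos]
    have := (PySem.List.mem_pyRange_one.mp hr).1
    omega)]
  norm_num

theorem pv_A_eq (board : List (List String)) (h : Pre_agg_height board) :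
    agg_height board
      = ((PySem.List.pyRange 0 ((PySem.List.pyGetD board 0 []).length : Int) 1).map
          (fun c => ((PySem.List.pyRange 1 (board.length : Int) 1).map
            (fun r => pvG board r c)).sum)).sum := by
  unfold agg_height
  rw [PySem.List.foldl_congr_mem _ _
    (fun h col => h + ((PySem.List.pyRange 1 (board.length : Int) 1).map
        (fun r => pvG board r col)).sum) 0
    (fun acc col _ => pv_A_inner board h.1 col acc),
    PySem.List.foldl_add]
  norm_num

theorem pv_B_inner (board : List (List String)) (w : Int) (r acc : Int) :
    (PySem.List.pyRange 0 w 1).foldl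
      (fun acc2 c =>
        if PySem.List.pyGetD (PySem.List.pyGetD board r []) c "" = " " ∧
           PySem.List.pyGetD (PySem.List.pyGetD board (r - 1) []) c "" = "x"
        then acc2 + 1 else acc2) acc
    = acc + ((PySem.List.pyRange 0 w 1).map
        (fun c => if pvCell board r c = " " ∧ pvCell board (r - 1) c = "x"
                  then (1 : Int) else 0)).sum := by
  rw [PySem.List.foldl_congr_mem _ _
    (fun acc2 c => acc2 + (if pvCell board r c = " " ∧ pvCell board (r - 1) c = "x"
                  then (1 : Int) else 0)) acc
    (by intro a c _; dsimp only; unfold pvCell; split_ifs <;> omega),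
    PySem.List.foldl_add]

theorem pv_B_eq (board : List (List String)) (h : Pre_agg_height board) :
    agg_height_alt board
      = ((PySem.List.pyRange 1 (board.length : Int) 1).map
          (fun r => ((PySem.List.pyRange 0 ((PySem.List.pyGetD board 0 []).length : Int) 1).map
            (fun c => pvG board r c)).sum)).sum := by
  rw [show agg_height_alt board
      = ((PySem.List.slice board (some 1) none).map
          (fun row => ((PySem.List.count (PySem.List.slice row none
            (some ((PySem.List.pyGetD board 0 []).length : Int))) "x" : Nat) : Int))).sum
        + (PySem.List.pyRange 1 (board.length : Int) 1).foldl
            (fun acc r =>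
              (PySem.List.pyRange 0 ((PySem.List.pyGetD board 0 []).length : Int) 1).foldl
                (fun acc2 c =>
                  if PySem.List.pyGetD (PySem.List.pyGetD board r []) c "" = " " ∧
                     PySem.List.pyGetD (PySem.List.pyGetD board (r - 1) []) c "" = "x"
                  then acc2 + 1 else acc2)
                acc)
            0 from rfl]
  -- rewrite each column sum over pyRange into a sum over List.range
  have hcol : ∀ r : Int,
      ((PySem.List.pyRange 0 ((PySem.List.pyGetD board 0 []).length : Int) 1).map
        (fun c => pvG board r c)).sum
      = ((List.range (PySem.List.pyGetD board 0 []).length).map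
          (fun k => (if (PySem.List.pyGetD board r []).getD k "" = "x" then (1 : Int) else 0)
            + (if (PySem.List.pyGetD board r []).getD k "" = " " ∧
                  (PySem.List.pyGetD board (r - 1) []).getD k "" = "x" then (1 : Int) else 0))).sum := by
    intro r
    rw [PySem.List.pyRange_zero_natCast, List.map_map]
    apply congrArg
    apply List.map_congr_left
    intro k _
    simp [pvG, pvCell, PySem.List.pyGetD_natCast]
  -- blanks as a double sum
  rw [PySem.List.foldl_congr_mem _ _
    (fun acc r => acc + ((PySem.List.pyRange 0 ((PySem.List.pyGetD board 0 []).length : Int) 1).map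
        (fun c => if pvCell board r c = " " ∧ pvCell board (r - 1) c = "x"
                  then (1 : Int) else 0)).sum) 0
    (fun acc r _ => pv_B_inner board _ r acc),
    PySem.List.foldl_add]
  -- filled as a double sum
  have hdrop : List.drop 1 board
      = (PySem.List.pyRange 1 (board.length : Int) 1).map (fun j => PySem.List.pyGetD board j []) := by
    have h1 := PySem.List.map_pyGetD_pyRange' board [] (a := 1) (by norm_num)
    simpa using h1.symm
  rw [PySem.List.slice_from_one, ← List.drop_one, hdrop, List.map_map]
  rw [List.map_congr_left (l := PySem.List.pyRange 1 (board.length : Int) 1)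
    (f := fun j => ((fun row => ((PySem.List.count (PySem.List.slice row none
        (some ((PySem.List.pyGetD board 0 []).length : Int))) "x" : Nat) : Int)) ∘
        (fun j => PySem.List.pyGetD board j [])) j)
    (g := fun j => ((List.range (PySem.List.pyGetD board 0 []).length).map
        (fun k => if (PySem.List.pyGetD board j []).getD k "" = "x" then (1 : Int) else 0)).sum)
    (by
      intro j hj
      have hmem := PySem.List.mem_pyRange_one.mp hj
      have hin : PySem.Raise.InRange board.length j := by
        simp [PySem.Raise.InRange]; omega
      have hrow : PySem.List.pyGetD board j [] ∈ board := PySem.List.pyGetD_mem board [] hin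
      have hw : (PySem.List.pyGetD board 0 []).length ≤ (PySem.List.pyGetD board j []).length := by
        rw [PySem.List.pyGetD_zero]; exact h.2 _ hrow
      simp only [Function.comp]
      rw [PySem.List.slice_to_natCast, PySem.List.count_eq,
        pv_count_take _ _ _ hw])]
  -- combine the two row sums into one
  rw [zero_add, ← PySem.List.sum_map_add_int]
  symm
  apply congrArg
  apply List.map_congr_left
  intro r _
  rw [hcol r, PySem.List.sum_map_add_int]
  congr 1
  rw [PySem.List.pyRange_zero_natCast, List.map_map]
  apply congrArg
  apply List.map_congr_left
  intro k _
  simp [pvCell, PySem.List.pyGetD_natCast]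

-- ===== VERDICT (by name: the statement is the Claim_ definition above) =====
theorem agg_height_spec : Claim_equal_agg_height := by
  intro board _ hpre
  unfold Spec_agg_height
  rw [pv_A_eq board hpre, pv_B_eq board hpre, pv_sum_map_swap]
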